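-- pv_equiv track=rewrite | github.com/zhoubinxin/action-repo | 189/cloud_check_in.py | base64_to_hex
-- ===== SOURCE A (Python) =====
-- def int_to_base36_char(value):
--     base36_chars = "0123456789abcdefghijklmnopqrstuvwxyz"
--     return base36_chars[value]
--
-- def base64_to_hex(b64_string):
--     B64MAP = "ABCDEFGHIJKLMNOPQRSTUVWXYZabcdefghijklmnopqrstuvwxyz0123456789+/"
--     hex_string = ""
--     carry = 0
--     buffer = 0
--     for char in b64_string:
--         if char != "=":
--             value = B64MAP.index(char)
--             if carry == 0:
--                 carry = 1
--                 hex_string += int_to_base36_char(value >> 2)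
--                 buffer = 3 & value
--             elif carry == 1:
--                 carry = 2
--                 hex_string += int_to_base36_char(buffer << 2 | value >> 4)
--                 buffer = 15 & value
--             elif carry == 2:
--                 carry = 3
--                 hex_string += int_to_base36_char(buffer)
--                 hex_string += int_to_base36_char(value >> 2)
--                 buffer = 3 & value
--             else:
--                 carry = 0
--                 hex_string += int_to_base36_char(buffer << 2 | value >> 4)
--                 hex_string += int_to_base36_char(15 & value)
--     if carry == 1:
--         hex_string += int_to_base36_char(buffer << 2)
--     return hex_string
-- ===== SOURCE B (Python) =====
-- def base64_to_hex(b64_string):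
--     B64MAP = "ABCDEFGHIJKLMNOPQRSTUVWXYZabcdefghijklmnopqrstuvwxyz0123456789+/"
--     digits = "0123456789abcdefghijklmnopqrstuvwxyz"
--     vals = [B64MAP.index(c) for c in b64_string if c != "="]
--     out = []
--     i = 0
--     while i + 4 <= len(vals):
--         v1, v2, v3, v4 = vals[i:i + 4]
--         i += 4
--         n = (v1 << 18) + (v2 << 12) + (v3 << 6) + v4
--         out.append(digits[n >> 20])
--         out.append(digits[(n >> 16) & 15])
--         out.append(digits[(n >> 12) & 15])
--         out.append(digits[(n >> 8) & 15])
--         out.append(digits[(n >> 4) & 15])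
--         out.append(digits[n & 15])
--     rest = vals[i:]
--     if len(rest) == 1:
--         v1 = rest[0]
--         out.append(digits[v1 >> 2])
--         out.append(digits[(v1 & 3) << 2])
--     elif len(rest) == 2:
--         v1, v2 = rest
--         out.append(digits[v1 >> 2])
--         out.append(digits[((v1 & 3) << 2) + (v2 >> 4)])
--     elif len(rest) == 3:
--         v1, v2, v3 = rest
--         out.append(digits[v1 >> 2])
--         out.append(digits[((v1 & 3) << 2) + (v2 >> 4)])
--         out.append(digits[v2 & 15])
--         out.append(digits[v3 >> 2])
--     return "".join(out)
-- ===== Notes on version B (the rewrite author's own statement) =====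
-- stated objective: alternative
-- what changed: A's per-character 4-phase carry/buffer state machine is replaced by a standard base64 group decoder: decode the payload (padding-stripped) characters once, consume them four at a time as a 24-bit word emitted as six hex digits, and finish the 1/2/3-value tail with direct bit formulas.
import Mathlib
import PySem

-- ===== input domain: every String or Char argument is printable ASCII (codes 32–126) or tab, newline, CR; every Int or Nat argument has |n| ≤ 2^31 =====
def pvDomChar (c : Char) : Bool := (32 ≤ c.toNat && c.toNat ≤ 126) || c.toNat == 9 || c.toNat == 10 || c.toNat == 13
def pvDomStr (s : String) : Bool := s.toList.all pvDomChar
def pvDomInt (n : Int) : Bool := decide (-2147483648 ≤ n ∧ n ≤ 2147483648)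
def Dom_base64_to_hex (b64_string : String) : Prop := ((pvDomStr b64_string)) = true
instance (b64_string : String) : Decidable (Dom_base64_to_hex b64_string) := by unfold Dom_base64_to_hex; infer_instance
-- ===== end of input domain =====

-- B replaces A's 4-phase carry/buffer state machine by a standard base64 decoder that
-- consumes whole 4-char groups (24 bits -> 6 hex digits) and handles the 1/2/3-char
-- tail by direct formulas; same return value (objective: alternative decomposition).

def pvB64MAP : List Char := "ABCDEFGHIJKLMNOPQRSTUVWXYZabcdefghijklmnopqrstuvwxyz0123456789+/".toList

-- ===== PORT A =====
-- helper int_to_base36_char: base36_chars[value]; every call site passes 0 ≤ value < 36, so getD is exact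
def int_to_base36_char (value : Nat) : Char :=
  "0123456789abcdefghijklmnopqrstuvwxyz".toList.getD value ' '

-- one iteration of A's for-loop; none = the ValueError B64MAP.index raises on a char not in the map
def pvAStep (st : List Char × Nat × Nat) (c : Char) : Option (List Char × Nat × Nat) :=
  if c = '=' then some st else
    match PySem.List.index? pvB64MAP c with
    | none => none
    | some value =>
      match st with
      | (hex, carry, buffer) =>
        if carry = 0 then some (hex ++ [int_to_base36_char (value >>> 2)], 1, 3 &&& value)
        else if carry = 1 then some (hex ++ [int_to_base36_char ((buffer <<< 2) ||| (value >>> 4))], 2, 15 &&& value)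
        else if carry = 2 then some (hex ++ [int_to_base36_char buffer, int_to_base36_char (value >>> 2)], 3, 3 &&& value)
        else some (hex ++ [int_to_base36_char ((buffer <<< 2) ||| (value >>> 4)), int_to_base36_char (15 &&& value)], 0, buffer)

def base64_to_hex (b64_string : String) : String :=
  match b64_string.toList.foldl (fun ost c => ost.bind (fun st => pvAStep st c)) (some ([], 0, 0)) with
  | none => ""   -- Python raises ValueError here; excluded by Pre_
  | some (hex, carry, buffer) =>
      String.ofList (if carry = 1 then hex ++ [int_to_base36_char (buffer <<< 2)] else hex)

-- ===== PORT B =====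
-- digits[v] of Source B (same table as A's helper; exact for v < 36)
def pvDigit (v : Nat) : Char :=
  "0123456789abcdefghijklmnopqrstuvwxyz".toList.getD v ' '

-- Source B's comprehension building vals (skip padding, decode the rest); none = ValueError
def pvVals? : List Char → Option (List Nat)
  | [] => some []
  | c :: cs =>
    if c = '=' then pvVals? cs else
      match PySem.List.index? pvB64MAP c, pvVals? cs with
      | some v, some vs => some (v :: vs)
      | _, _ => none

-- Source B's while-loop (4 values -> 6 hex digits) followed by the 1/2/3-value tail branches
def pvGroups : List Nat → List Char
  | v1 :: v2 :: v3 :: v4 :: rest =>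
    let n := (v1 <<< 18) + (v2 <<< 12) + (v3 <<< 6) + v4
    pvDigit (n >>> 20) :: pvDigit ((n >>> 16) &&& 15) :: pvDigit ((n >>> 12) &&& 15) ::
    pvDigit ((n >>> 8) &&& 15) :: pvDigit ((n >>> 4) &&& 15) :: pvDigit (n &&& 15) :: pvGroups rest
  | [v1] => [pvDigit (v1 >>> 2), pvDigit ((v1 &&& 3) <<< 2)]
  | [v1, v2] => [pvDigit (v1 >>> 2), pvDigit (((v1 &&& 3) <<< 2) + (v2 >>> 4))]
  | [v1, v2, v3] => [pvDigit (v1 >>> 2), pvDigit (((v1 &&& 3) <<< 2) + (v2 >>> 4)),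
                     pvDigit (v2 &&& 15), pvDigit (v3 >>> 2)]
  | [] => []

def base64_to_hex_alt (b64_string : String) : String :=
  match pvVals? b64_string.toList with
  | none => ""   -- Python raises ValueError here; excluded by Pre_
  | some vals => String.ofList (pvGroups vals)

-- ===== PRECONDITION & SPEC =====
-- Pre_ excludes exactly the strings containing a character outside B64MAP other than padding:
-- there both A and B raise ValueError from str.index.
def Pre_base64_to_hex (b64_string : String) : Prop :=
  (b64_string.toList.all (fun c => c == '=' || pvB64MAP.contains c)) = true
instance (b64_string : String) : Decidable (Pre_base64_to_hex b64_string) := by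
  unfold Pre_base64_to_hex; infer_instance

def pvWitness_base64_to_hex : String := "QUJD=A"

def Spec_base64_to_hex (b64_string : String) (out : String) : Prop := out = base64_to_hex_alt b64_string
instance (b64_string : String) (out : String) : Decidable (Spec_base64_to_hex b64_string out) := by
  unfold Spec_base64_to_hex; infer_instance

-- ===== CLAIM (what is proved, stated in full; the proofs are below) =====
def Claim_equal_base64_to_hex : Prop := ∀ (b64_string : String), Dom_base64_to_hex b64_string → Pre_base64_to_hex b64_string → Spec_base64_to_hex b64_string (base64_to_hex b64_string)

-- ===== LEMMAS AND PROOFS =====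

-- A's state machine on the already-decoded value list (proof-side reformulation of A's loop)
def pvMachA : List Char × Nat × Nat → List Nat → List Char × Nat × Nat
  | st, [] => st
  | (hex, carry, buffer), v :: vs =>
    if carry = 0 then pvMachA (hex ++ [int_to_base36_char (v >>> 2)], 1, 3 &&& v) vs
    else if carry = 1 then pvMachA (hex ++ [int_to_base36_char ((buffer <<< 2) ||| (v >>> 4))], 2, 15 &&& v) vs
    else if carry = 2 then pvMachA (hex ++ [int_to_base36_char buffer, int_to_base36_char (v >>> 2)], 3, 3 &&& v) vs
    else pvMachA (hex ++ [int_to_base36_char ((buffer <<< 2) ||| (v >>> 4)), int_to_base36_char (15 &&& v)], 0, buffer) vs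

-- A's trailing flush
def pvFinal : List Char × Nat × Nat → List Char
  | (hex, carry, buffer) => if carry = 1 then hex ++ [int_to_base36_char (buffer <<< 2)] else hex

lemma pvIndex_lt {c : Char} {k : Nat} (h : PySem.List.index? pvB64MAP c = some k) : k < 64 := by
  obtain ⟨hk, -, -⟩ := PySem.List.getElem_of_index?_eq_some h
  simpa [pvB64MAP] using hk

lemma pvVals?_some {cs : List Char} (h : ∀ c ∈ cs, c = '=' ∨ c ∈ pvB64MAP) :
    ∃ vs, pvVals? cs = some vs ∧ ∀ v ∈ vs, v < 64 := by
  induction cs with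
  | nil => exact ⟨[], rfl, by simp⟩
  | cons c cs ih =>
    obtain ⟨vs, hvs, hb⟩ := ih (fun x hx => h x (List.mem_cons_of_mem _ hx))
    rcases h c (List.mem_cons_self ..) with hc | hc
    · exact ⟨vs, by simp [pvVals?, hc, hvs], hb⟩
    · have : (PySem.List.index? pvB64MAP c).isSome := (PySem.List.index?_isSome_iff ..).2 hc
      obtain ⟨k, hk⟩ := Option.isSome_iff_exists.1 this
      have hk' := hk
      simp only [PySem.List.index?_eq_idxOf?] at hk'
      by_cases hce : c = '='
      · exact ⟨vs, by simp [pvVals?, hce, hvs], hb⟩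
      · refine ⟨k :: vs, by simp [pvVals?, hce, hk', hvs], ?_⟩
        intro v hv
        rcases List.mem_cons.1 hv with rfl | hv
        · exact pvIndex_lt hk
        · exact hb v hv
    
lemma pvFoldA_eq {cs : List Char} {vs : List Nat} (hvs : pvVals? cs = some vs) :
    ∀ st, cs.foldl (fun ost c => ost.bind (fun st => pvAStep st c)) (some st) = some (pvMachA st vs) := by
  induction cs generalizing vs with
  | nil =>
    intro st
    simp only [pvVals?, Option.some.injEq] at hvs
    subst hvs
    rfl
  | cons c cs ih =>
    intro st
    by_cases hce : c = '='
    · simp only [pvVals?, if_pos hce] at hvs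
      simpa [pvAStep, hce] using ih hvs st
    · simp only [pvVals?, if_neg hce] at hvs
      rcases hidx : PySem.List.index? pvB64MAP c with - | k <;> rw [hidx] at hvs
      · cases hvs
      · rcases hrest : pvVals? cs with - | vs' <;> rw [hrest] at hvs
        · cases hvs
        · simp only [Option.some.injEq] at hvs
          subst hvs
          obtain ⟨hex, carry, buffer⟩ := st
          simp only [List.foldl_cons, Option.bind_some]
          rw [pvAStep]
          simp only [if_neg hce, hidx]
          by_cases h0 : carry = 0
          · simp [h0, pvMachA, ih hrest]
          · by_cases h1 : carry = 1
            · simp [h0, h1, pvMachA, ih hrest]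
            · by_cases h2 : carry = 2
              · simp [h0, h1, h2, pvMachA, ih hrest]
              · simp [h0, h1, h2, pvMachA, ih hrest]

lemma pvAnd15 (x : Nat) : x &&& 15 = x % 16 := by
  simpa using Nat.and_two_pow_sub_one_eq_mod x 4
lemma pvAnd15' (x : Nat) : 15 &&& x = x % 16 := by rw [Nat.and_comm]; exact pvAnd15 x
lemma pvAnd3 (x : Nat) : x &&& 3 = x % 4 := by
  simpa using Nat.and_two_pow_sub_one_eq_mod x 2
lemma pvAnd3' (x : Nat) : 3 &&& x = x % 4 := by rw [Nat.and_comm]; exact pvAnd3 x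

lemma pvOrSmall (x y : Nat) (hx : x < 4) (hy : y < 4) : (x <<< 2) ||| y = x * 4 + y := by
  interval_cases x <;> interval_cases y <;> rfl

lemma pvDigit_eq : pvDigit = int_to_base36_char := rfl

-- the heart: A's machine started in phase 0, then flushed, equals B's group decoder
lemma pvMach_eq_groups (vs : List Nat) (hb : ∀ v ∈ vs, v < 64) :
    ∀ acc b, pvFinal (pvMachA (acc, 0, b) vs) = acc ++ pvGroups vs := by
  induction vs using pvGroups.induct with
  | case1 v1 v2 v3 v4 rest ih =>
    intro acc b
    have h1 := hb v1 (by simp); have h2 := hb v2 (by simp); have h3 := hb v3 (by simp)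
    have h4 := hb v4 (by simp)
    have o1 : ((3 &&& v1) <<< 2) ||| (v2 >>> 4) = (3 &&& v1) * 4 + v2 >>> 4 :=
      pvOrSmall _ _ (by rw [pvAnd3']; omega) (by simp [Nat.shiftRight_eq_div_pow]; omega)
    have o3 : ((3 &&& v3) <<< 2) ||| (v4 >>> 4) = (3 &&& v3) * 4 + v4 >>> 4 :=
      pvOrSmall _ _ (by rw [pvAnd3']; omega) (by simp [Nat.shiftRight_eq_div_pow]; omega)
    have e1 : ((v1 <<< 18) + (v2 <<< 12) + (v3 <<< 6) + v4) >>> 20 = v1 >>> 2 := by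
      simp only [Nat.shiftLeft_eq, Nat.shiftRight_eq_div_pow]; norm_num; omega
    have e2 : (((v1 <<< 18) + (v2 <<< 12) + (v3 <<< 6) + v4) >>> 16) &&& 15
        = ((3 &&& v1) <<< 2) ||| (v2 >>> 4) := by
      rw [o1]
      simp only [Nat.shiftLeft_eq, Nat.shiftRight_eq_div_pow, pvAnd15, pvAnd3']
      norm_num; omega
    have e3 : (((v1 <<< 18) + (v2 <<< 12) + (v3 <<< 6) + v4) >>> 12) &&& 15 = 15 &&& v2 := by
      simp only [Nat.shiftLeft_eq, Nat.shiftRight_eq_div_pow, pvAnd15, pvAnd15']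
      norm_num; omega
    have e4 : (((v1 <<< 18) + (v2 <<< 12) + (v3 <<< 6) + v4) >>> 8) &&& 15 = v3 >>> 2 := by
      simp only [Nat.shiftLeft_eq, Nat.shiftRight_eq_div_pow, pvAnd15]
      norm_num; omega
    have e5 : (((v1 <<< 18) + (v2 <<< 12) + (v3 <<< 6) + v4) >>> 4) &&& 15
        = ((3 &&& v3) <<< 2) ||| (v4 >>> 4) := by
      rw [o3]
      simp only [Nat.shiftLeft_eq, Nat.shiftRight_eq_div_pow, pvAnd15, pvAnd3']
      norm_num; omega
    have e6 : ((v1 <<< 18) + (v2 <<< 12) + (v3 <<< 6) + v4) &&& 15 = 15 &&& v4 := by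
      simp only [Nat.shiftLeft_eq, pvAnd15, pvAnd15']
      norm_num; omega
    simp only [pvMachA]
    norm_num
    rw [ih (fun v hv => hb v (by simp [hv])) _ _]
    simp [pvGroups, pvDigit_eq, e1, e2, e3, e4, e5, e6]
  | case2 v1 =>
    intro acc b
    simp [pvMachA, pvFinal, pvGroups, pvDigit_eq, pvAnd3, pvAnd3']
  | case3 v1 v2 =>
    intro acc b
    have h1 := hb v1 (by simp); have h2 := hb v2 (by simp)
    have o1 : v1 % 4 * 4 ||| v2 >>> 4 = v1 % 4 * 4 + v2 >>> 4 := by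
      have := pvOrSmall (v1 % 4) (v2 >>> 4) (by omega)
        (by simp [Nat.shiftRight_eq_div_pow]; omega)
      simpa [Nat.shiftLeft_eq] using this
    simp [pvMachA, pvFinal, pvGroups, pvDigit_eq, o1, pvAnd3, pvAnd3', Nat.shiftLeft_eq]
  | case4 v1 v2 v3 =>
    intro acc b
    have h1 := hb v1 (by simp); have h2 := hb v2 (by simp)
    have o1 : v1 % 4 * 4 ||| v2 >>> 4 = v1 % 4 * 4 + v2 >>> 4 := by
      have := pvOrSmall (v1 % 4) (v2 >>> 4) (by omega)
        (by simp [Nat.shiftRight_eq_div_pow]; omega)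
      simpa [Nat.shiftLeft_eq] using this
    simp [pvMachA, pvFinal, pvGroups, pvDigit_eq, o1, pvAnd3, pvAnd3', pvAnd15, pvAnd15',
      Nat.shiftLeft_eq]
  | case5 =>
    intro acc b
    simp [pvMachA, pvFinal, pvGroups]

-- ===== VERDICT (by name: the statement is the Claim_ definition above) =====
theorem base64_to_hex_spec : Claim_equal_base64_to_hex := by
  intro s _ hpre
  unfold Pre_base64_to_hex at hpre
  have hpre' : ∀ c ∈ s.toList, c = '=' ∨ c ∈ pvB64MAP := by
    intro c hc
    have := List.all_eq_true.1 hpre c hc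
    simpa using this
  unfold Spec_base64_to_hex base64_to_hex base64_to_hex_alt
  obtain ⟨vs, hvs, hb⟩ := pvVals?_some hpre'
  rw [pvFoldA_eq hvs ([], 0, 0), hvs]
  have hmain := pvMach_eq_groups vs hb [] 0
  rcases hmach : pvMachA ([], 0, 0) vs with ⟨hex, carry, buffer⟩
  rw [hmach] at hmain
  simp only [pvFinal, List.nil_append] at hmain
  simp [hmain]
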